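-- pv_equiv track=rewrite | github.com/gabrieldelisle/Euler-project | euler103.py | indices_needed
-- ===== SOURCE A (Python) =====
-- def disjoint2(l) :
-- 	res = [([],[])]
-- 	for e in l :
-- 		res2 = []
-- 		for a,b in res :
-- 			if a or b :
-- 				res2.append((a+[e],b))
-- 			res2.append((a,b+[e]))
-- 			res2.append((a,b))
-- 		res = res2.copy()
-- 	return res
--
-- def clear(l) :
-- 	res = []
-- 	for u in l :
-- 		if u[0] and u[1] :
-- 			res.append(u)
-- 	return res
--
-- def indices_needed(n) :
-- 	liste = clear(disjoint2(list(range(n))))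
-- 	needed = []
-- 	for a,b in liste :
-- 		if len(a)==len(b) and len(a)>1:
-- 			valid = True
-- 			if a[0]>b[0] :
-- 				a,b = b,a
-- 			for j in range(len(a)) :
-- 				if a[j]>b[j] :
-- 					valid = False
-- 			if not valid :
-- 				needed.append((a,b))
-- 	return needed
-- ===== SOURCE B (Python) =====
-- # Single recursive DFS backtracker fusing disjoint2/clear/filter into one pass.
-- def indices_needed(n):
--     needed = []
--     elems = list(range(n))
--
--     def rec(i, a, b):
--         if i == len(elems):
--             if len(a) == len(b) and len(a) > 1:
--                 if a[0] > b[0]: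
--                     a, b = b, a
--                 if any(x > y for x, y in zip(a, b)):
--                     needed.append((a, b))
--             return
--         e = elems[i]
--         if a or b:
--             rec(i + 1, a + [e], b)
--         rec(i + 1, a, b + [e])
--         rec(i + 1, a, b)
--
--     rec(0, [], [])
--     return needed
-- ===== Notes on version B (the rewrite author's own statement) =====
-- stated objective: alternative
-- what changed: Replaced the three-pass pipeline (BFS enumeration of all disjoint subset pairs into a materialised list, a clearing pass, then a filtering loop) by a single recursive DFS backtracker that explores the same choice tree and applies the leaf filter on the fly, never materialising the intermediate lists.
import Mathlib
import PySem

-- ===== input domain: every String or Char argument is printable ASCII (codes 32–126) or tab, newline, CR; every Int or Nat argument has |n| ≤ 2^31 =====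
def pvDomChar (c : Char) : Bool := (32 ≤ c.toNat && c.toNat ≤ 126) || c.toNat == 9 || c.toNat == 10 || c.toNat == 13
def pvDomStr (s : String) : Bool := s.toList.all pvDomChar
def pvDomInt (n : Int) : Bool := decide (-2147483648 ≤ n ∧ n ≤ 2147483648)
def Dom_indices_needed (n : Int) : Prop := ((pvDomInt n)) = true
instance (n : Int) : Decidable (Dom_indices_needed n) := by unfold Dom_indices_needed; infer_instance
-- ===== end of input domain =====

-- B replaces the BFS list-of-all-pairs pipeline (disjoint2 → clear → filter loop) by one
-- recursive DFS backtracker that applies the leaf filter as it goes; same output, one pass.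

-- ===== PORT A =====
-- disjoint2: BFS over elements, each pair expanded to its (2 or 3) children in order.
def pvDisjoint2 (l : List Int) : List (List Int × List Int) :=
  l.foldl (fun res e =>
    res.foldl (fun res2 p =>
      ((if p.1 ≠ [] ∨ p.2 ≠ [] then res2 ++ [(p.1 ++ [e], p.2)] else res2)
        ++ [(p.1, p.2 ++ [e])]) ++ [(p.1, p.2)]) []) [([], [])]

-- clear: keep pairs with both parts nonempty.
def pvClear (l : List (List Int × List Int)) : List (List Int × List Int) :=
  l.foldl (fun res u => if u.1 ≠ [] ∧ u.2 ≠ [] then res ++ [u] else res) []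

def indices_needed (n : Int) : List (List Int × List Int) :=
  let liste := pvClear (pvDisjoint2 (PySem.List.pyRange 0 n 1))
  liste.foldl (fun needed p =>
    if p.1.length = p.2.length ∧ 1 < p.1.length then
      -- a[0], b[0], a[j], b[j] are always in range here (len > 1, j < len): pyGetD is exact
      let ab := if PySem.List.pyGetD p.1 0 0 > PySem.List.pyGetD p.2 0 0 then (p.2, p.1) else (p.1, p.2)
      let valid := (PySem.List.pyRange 0 (ab.1.length : Int) 1).foldl
        (fun v j => if PySem.List.pyGetD ab.1 j 0 > PySem.List.pyGetD ab.2 j 0 then false else v) true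
      if !valid then needed ++ [ab] else needed
    else needed) []

-- ===== PORT B =====
-- leaf filter of the DFS backtracker
def pvLeafB (a b : List Int) : List (List Int × List Int) :=
  if a.length = b.length ∧ 1 < a.length then
    let ab := if PySem.List.pyGetD a 0 0 > PySem.List.pyGetD b 0 0 then (b, a) else (a, b)
    if (ab.1.zip ab.2).any (fun q => q.1 > q.2) then [ab] else []
  else []

-- rec(i, a, b): try e in a (unless both empty), then in b, then discard
def pvRecB : List Int → List Int → List Int → List (List Int × List Int)
  | [], a, b => pvLeafB a b
  | e :: l, a, b =>
      (if a ≠ [] ∨ b ≠ [] then pvRecB l (a ++ [e]) b else [])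
        ++ pvRecB l a (b ++ [e]) ++ pvRecB l a b

def indices_needed_alt (n : Int) : List (List Int × List Int) :=
  pvRecB (PySem.List.pyRange 0 n 1) [] []

-- ===== PRECONDITION & SPEC =====
def Spec_indices_needed (n : Int) (out : List (List Int × List Int)) : Prop := out = indices_needed_alt n
instance (n : Int) (out : List (List Int × List Int)) : Decidable (Spec_indices_needed n out) := by unfold Spec_indices_needed; infer_instance

-- ===== CLAIM (what is proved, stated in full; the proofs are below) =====
def Claim_equal_indices_needed : Prop := ∀ (n : Int), Dom_indices_needed n → Spec_indices_needed n (indices_needed n)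

-- ===== LEMMAS AND PROOFS =====

-- children of a pair in disjoint2's expansion
def pvChildren (e : Int) (p : List Int × List Int) : List (List Int × List Int) :=
  (if p.1 ≠ [] ∨ p.2 ≠ [] then [(p.1 ++ [e], p.2)] else []) ++ [(p.1, p.2 ++ [e]), (p.1, p.2)]

-- unfiltered DFS enumeration
def pvRec0 : List Int → (List Int × List Int) → List (List Int × List Int)
  | [], p => [p]
  | e :: l, p =>
      (if p.1 ≠ [] ∨ p.2 ≠ [] then pvRec0 l (p.1 ++ [e], p.2) else [])
        ++ pvRec0 l (p.1, p.2 ++ [e]) ++ pvRec0 l (p.1, p.2)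

-- A's per-pair leaf computation (what the needed-loop appends for one pair)
def pvLeafA (p : List Int × List Int) : List (List Int × List Int) :=
  if p.1.length = p.2.length ∧ 1 < p.1.length then
    let ab := if PySem.List.pyGetD p.1 0 0 > PySem.List.pyGetD p.2 0 0 then (p.2, p.1) else (p.1, p.2)
    let valid := (PySem.List.pyRange 0 (ab.1.length : Int) 1).foldl
      (fun v j => if PySem.List.pyGetD ab.1 j 0 > PySem.List.pyGetD ab.2 j 0 then false else v) true
    if !valid then [ab] else []
  else []

theorem pv_flatMap_filter {α β : Type} (c : α → Bool) (f : α → List β) :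
    ∀ l : List α, (l.filter c).flatMap f = l.flatMap (fun x => if c x then f x else [])
  | [] => rfl
  | x :: l => by
    by_cases h : c x = true <;>
      simp [h, List.flatMap_cons, pv_flatMap_filter c f l]

theorem pv_step_eq (e : Int) (res : List (List Int × List Int)) :
    res.foldl (fun res2 p =>
      ((if p.1 ≠ [] ∨ p.2 ≠ [] then res2 ++ [(p.1 ++ [e], p.2)] else res2)
        ++ [(p.1, p.2 ++ [e])]) ++ [(p.1, p.2)]) [] = res.flatMap (pvChildren e) := by
  have h : (fun (res2 : List (List Int × List Int)) p =>
      ((if p.1 ≠ [] ∨ p.2 ≠ [] then res2 ++ [(p.1 ++ [e], p.2)] else res2)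
        ++ [(p.1, p.2 ++ [e])]) ++ [(p.1, p.2)]) = fun res2 p => res2 ++ pvChildren e p := by
    funext res2 p
    by_cases h : p.1 ≠ [] ∨ p.2 ≠ [] <;> simp [pvChildren, h]
  rw [h, PySem.List.foldl_append_eq_flatMap]
  simp

theorem pv_bfs_dfs (l : List Int) :
    ∀ res : List (List Int × List Int),
      l.foldl (fun res e =>
        res.foldl (fun res2 p =>
          ((if p.1 ≠ [] ∨ p.2 ≠ [] then res2 ++ [(p.1 ++ [e], p.2)] else res2)
            ++ [(p.1, p.2 ++ [e])]) ++ [(p.1, p.2)]) []) res = res.flatMap (pvRec0 l) := by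
  induction l with
  | nil => intro res; simp [pvRec0]
  | cons e l ih =>
    intro res
    rw [List.foldl_cons, pv_step_eq, ih, List.flatMap_assoc]
    apply List.flatMap_congr
    intro p _
    by_cases h : p.1 ≠ [] ∨ p.2 ≠ [] <;> simp [pvChildren, pvRec0, h]

-- the index-based any equals zip-based any when lengths agree
theorem pv_any_getD :
    ∀ (a b : List Int), a.length = b.length →
      ((List.range a.length).any (fun k => decide (a.getD k 0 > b.getD k 0))
        = (a.zip b).any (fun q => decide (q.1 > q.2)))
  | [], b, _ => by simp
  | x :: a, [], h => by simp at h
  | x :: a, y :: b, h => by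
    rw [List.length_cons, List.range_succ_eq_map, List.any_cons, List.any_map]
    rw [show ((fun k => decide ((x :: a).getD k 0 > (y :: b).getD k 0)) ∘ Nat.succ)
        = fun k => decide (a.getD k 0 > b.getD k 0) from by funext k; simp]
    rw [pv_any_getD a b (by simpa using h)]
    simp

theorem pv_valid_eq (a b : List Int) (h : a.length = b.length) :
    ((PySem.List.pyRange 0 (a.length : Int) 1).foldl
      (fun v j => if PySem.List.pyGetD a j 0 > PySem.List.pyGetD b j 0 then false else v) true)
      = !((a.zip b).any (fun q => decide (q.1 > q.2))) := by
  rw [show (fun (v : Bool) (j : Int) => if PySem.List.pyGetD a j 0 > PySem.List.pyGetD b j 0 then false else v)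
      = fun v j => if (fun j => decide (PySem.List.pyGetD a j 0 > PySem.List.pyGetD b j 0)) j = true then false else v from by
    funext v j; simp]
  rw [PySem.List.foldl_if_false_eq]
  rw [PySem.List.pyRange_one]
  simp only [Int.sub_zero, Int.toNat_natCast, List.any_map, Function.comp_def, Int.zero_add,
    PySem.List.pyGetD_natCast]
  rw [pv_any_getD a b h]
  simp

theorem pv_leafA_eq (p : List Int × List Int) :
    (if p.1 ≠ [] ∧ p.2 ≠ [] then pvLeafA p else []) = pvLeafB p.1 p.2 := by
  obtain ⟨a, b⟩ := p
  by_cases hl : a.length = b.length ∧ 1 < a.length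
  · have ha : a ≠ [] := List.ne_nil_of_length_pos (by omega)
    have hb : b ≠ [] := List.ne_nil_of_length_pos (by omega)
    simp only [pvLeafA, pvLeafB]
    rw [if_pos ⟨ha, hb⟩, if_pos hl, if_pos hl]
    by_cases hsw : PySem.List.pyGetD a 0 0 > PySem.List.pyGetD b 0 0
    · rw [if_pos hsw]
      simp only
      rw [pv_valid_eq b a hl.1.symm]
      rw [Bool.not_not]
    · rw [if_neg hsw]
      simp only
      rw [pv_valid_eq a b hl.1]
      rw [Bool.not_not]
  · simp only [pvLeafA, pvLeafB, if_neg hl]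
    by_cases hc : a ≠ [] ∧ b ≠ [] <;> simp [hc]

theorem pv_dfs_filter (l : List Int) :
    ∀ p : List Int × List Int,
      (pvRec0 l p).flatMap (fun q => if q.1 ≠ [] ∧ q.2 ≠ [] then pvLeafA q else [])
        = pvRecB l p.1 p.2 := by
  induction l with
  | nil => intro p; simp [pvRec0, pvRecB, pv_leafA_eq]
  | cons e l ih =>
    intro p
    by_cases h : p.1 ≠ [] ∨ p.2 ≠ [] <;>
      simp [pvRec0, pvRecB, h, List.flatMap_append, ih]

theorem indices_needed_eq (n : Int) : indices_needed n = indices_needed_alt n := by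
  unfold indices_needed indices_needed_alt pvDisjoint2 pvClear
  rw [pv_bfs_dfs]
  have hneed : ∀ liste : List (List Int × List Int),
      liste.foldl (fun needed p =>
        if p.1.length = p.2.length ∧ 1 < p.1.length then
          let ab := if PySem.List.pyGetD p.1 0 0 > PySem.List.pyGetD p.2 0 0 then (p.2, p.1) else (p.1, p.2)
          let valid := (PySem.List.pyRange 0 (ab.1.length : Int) 1).foldl
            (fun v j => if PySem.List.pyGetD ab.1 j 0 > PySem.List.pyGetD ab.2 j 0 then false else v) true
          if !valid then needed ++ [ab] else needed
        else needed) [] = liste.flatMap pvLeafA := by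
    intro liste
    have h : (fun (needed : List (List Int × List Int)) p =>
        if p.1.length = p.2.length ∧ 1 < p.1.length then
          let ab := if PySem.List.pyGetD p.1 0 0 > PySem.List.pyGetD p.2 0 0 then (p.2, p.1) else (p.1, p.2)
          let valid := (PySem.List.pyRange 0 (ab.1.length : Int) 1).foldl
            (fun v j => if PySem.List.pyGetD ab.1 j 0 > PySem.List.pyGetD ab.2 j 0 then false else v) true
          if !valid then needed ++ [ab] else needed
        else needed) = fun needed p => needed ++ pvLeafA p := by
      funext needed p
      simp only [pvLeafA]
      split_ifs <;> simp
    rw [h, PySem.List.foldl_append_eq_flatMap]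
    simp
  rw [PySem.List.foldl_append_ite_eq_filter, hneed]
  simp only [List.nil_append, List.flatMap_cons, List.flatMap_nil, List.append_nil]
  rw [pv_flatMap_filter]
  simp only [decide_eq_true_eq]
  exact pv_dfs_filter _ ([], [])

-- ===== VERDICT (by name: the statement is the Claim_ definition above) =====
theorem indices_needed_spec : Claim_equal_indices_needed := by
  intro n _
  unfold Spec_indices_needed
  exact indices_needed_eq n
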